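-- pv_equiv track=rewrite | github.com/MondeNel/tenderscout-za | tenderscout-za/backend/scraper/utils.py | detect_province
-- ===== SOURCE A (Python) =====
-- from typing import Optional, Dict, List
--
-- PROVINCE_KEYWORDS: Dict[str, List[str]] = {
--     "Gauteng": [
--         "gauteng", "johannesburg", "pretoria", "ekurhuleni", "soweto",
--         "midrand", "tshwane", "centurion", "sandton", "randburg", "roodepoort",
--         "alexandra", "diepsloot", "ivory park", "katlehong", "thokoza",
--     ],
--     "Western Cape": [
--         "western cape", "cape town", "stellenbosch", "george", "paarl",
--         "worcester", "khayelitsha", "mitchells plain", "atlantis", "beaufort west",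
--         "ceres", "hermanus", "saldanha", "vredenburg",
--     ],
--     "KwaZulu-Natal": [
--         "kwazulu-natal", "kzn", "durban", "pietermaritzburg", "richards bay",
--         "ethekwini", "umhlanga", "phoenix", "chatsworth", "newcastle",
--         "ladysmith", "port shepstone", "empangeni",
--     ],
--     "Eastern Cape": [
--         "eastern cape", "gqeberha", "port elizabeth", "east london", "mthatha",
--         "buffalo city", "queenstown", "graaff-reinet", "aliwal north", "matatiele",
--         "mount frere", "lusikisiki", "butterworth", "komani",
--     ],
--     "Free State": [
--         "free state", "bloemfontein", "mangaung", "welkom", "bethlehem",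
--         "kroonstad", "sasolburg", "phuthaditjhaba", "harrismith",
--     ],
--     "Limpopo": [
--         "limpopo", "polokwane", "tzaneen", "bela-bela", "lephalale",
--         "modimolle", "thohoyandou", "burgersfort", "giyani", "makhado",
--     ],
--     "Mpumalanga": [
--         "mpumalanga", "nelspruit", "mbombela", "witbank", "emalahleni",
--         "middelburg", "secunda", "ermelo", "kabokweni", "malelane",
--     ],
--     "North West": [
--         "north west", "mahikeng", "rustenburg", "klerksdorp", "potchefstroom",
--         "brits", "lichtenburg", "vryburg", "taung",
--     ],
--     "Northern Cape": [
--         "northern cape", "kimberley", "upington", "springbok", "de aar",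
--         "prieska", "kuruman", "kathu", "postmasburg", "calvinia", "colesberg",
--         "victoria west", "carnarvon", "sutherland", "pofadder", "kakamas",
--         "groblershoop", "barkly west", "warrenton", "hartswater", "douglas",
--         "hopetown", "petrusville", "port nolloth", "garies",
--     ],
-- }
--
-- def detect_province(text: str) -> Optional[str]:
--     """
--     Detect province from text (used only for aggregators).
--
--     Direct portals use their configured province instead.
--
--     Args:
--         text: Tender text to analyze
--
--     Returns:
--         Province name or None if not detected
--     """
--     if not text:
--         return None
--
--     t = text.lower()
--     for province, keywords in PROVINCE_KEYWORDS.items():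
--         if any(k in t for k in keywords):
--             return province
--     return None
-- ===== SOURCE B (Python) =====
-- _PROVINCES = ['Gauteng', 'Western Cape', 'KwaZulu-Natal', 'Eastern Cape', 'Free State', 'Limpopo', 'Mpumalanga', 'North West', 'Northern Cape']
--
-- _KEYWORD_PROVINCE = [
--     ('gauteng', 'Gauteng'),
--     ('johannesburg', 'Gauteng'),
--     ('pretoria', 'Gauteng'),
--     ('ekurhuleni', 'Gauteng'),
--     ('soweto', 'Gauteng'),
--     ('midrand', 'Gauteng'),
--     ('tshwane', 'Gauteng'),
--     ('centurion', 'Gauteng'),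
--     ('sandton', 'Gauteng'),
--     ('randburg', 'Gauteng'),
--     ('roodepoort', 'Gauteng'),
--     ('alexandra', 'Gauteng'),
--     ('diepsloot', 'Gauteng'),
--     ('ivory park', 'Gauteng'),
--     ('katlehong', 'Gauteng'),
--     ('thokoza', 'Gauteng'),
--     ('western cape', 'Western Cape'),
--     ('cape town', 'Western Cape'),
--     ('stellenbosch', 'Western Cape'),
--     ('george', 'Western Cape'),
--     ('paarl', 'Western Cape'),
--     ('worcester', 'Western Cape'),
--     ('khayelitsha', 'Western Cape'),
--     ('mitchells plain', 'Western Cape'),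
--     ('atlantis', 'Western Cape'),
--     ('beaufort west', 'Western Cape'),
--     ('ceres', 'Western Cape'),
--     ('hermanus', 'Western Cape'),
--     ('saldanha', 'Western Cape'),
--     ('vredenburg', 'Western Cape'),
--     ('kwazulu-natal', 'KwaZulu-Natal'),
--     ('kzn', 'KwaZulu-Natal'),
--     ('durban', 'KwaZulu-Natal'),
--     ('pietermaritzburg', 'KwaZulu-Natal'),
--     ('richards bay', 'KwaZulu-Natal'),
--     ('ethekwini', 'KwaZulu-Natal'),
--     ('umhlanga', 'KwaZulu-Natal'),
--     ('phoenix', 'KwaZulu-Natal'),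
--     ('chatsworth', 'KwaZulu-Natal'),
--     ('newcastle', 'KwaZulu-Natal'),
--     ('ladysmith', 'KwaZulu-Natal'),
--     ('port shepstone', 'KwaZulu-Natal'),
--     ('empangeni', 'KwaZulu-Natal'),
--     ('eastern cape', 'Eastern Cape'),
--     ('gqeberha', 'Eastern Cape'),
--     ('port elizabeth', 'Eastern Cape'),
--     ('east london', 'Eastern Cape'),
--     ('mthatha', 'Eastern Cape'),
--     ('buffalo city', 'Eastern Cape'),
--     ('queenstown', 'Eastern Cape'),
--     ('graaff-reinet', 'Eastern Cape'),
--     ('aliwal north', 'Eastern Cape'),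
--     ('matatiele', 'Eastern Cape'),
--     ('mount frere', 'Eastern Cape'),
--     ('lusikisiki', 'Eastern Cape'),
--     ('butterworth', 'Eastern Cape'),
--     ('komani', 'Eastern Cape'),
--     ('free state', 'Free State'),
--     ('bloemfontein', 'Free State'),
--     ('mangaung', 'Free State'),
--     ('welkom', 'Free State'),
--     ('bethlehem', 'Free State'),
--     ('kroonstad', 'Free State'),
--     ('sasolburg', 'Free State'),
--     ('phuthaditjhaba', 'Free State'),
--     ('harrismith', 'Free State'),
--     ('limpopo', 'Limpopo'),
--     ('polokwane', 'Limpopo'),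
--     ('tzaneen', 'Limpopo'),
--     ('bela-bela', 'Limpopo'),
--     ('lephalale', 'Limpopo'),
--     ('modimolle', 'Limpopo'),
--     ('thohoyandou', 'Limpopo'),
--     ('burgersfort', 'Limpopo'),
--     ('giyani', 'Limpopo'),
--     ('makhado', 'Limpopo'),
--     ('mpumalanga', 'Mpumalanga'),
--     ('nelspruit', 'Mpumalanga'),
--     ('mbombela', 'Mpumalanga'),
--     ('witbank', 'Mpumalanga'),
--     ('emalahleni', 'Mpumalanga'),
--     ('middelburg', 'Mpumalanga'),
--     ('secunda', 'Mpumalanga'),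
--     ('ermelo', 'Mpumalanga'),
--     ('kabokweni', 'Mpumalanga'),
--     ('malelane', 'Mpumalanga'),
--     ('north west', 'North West'),
--     ('mahikeng', 'North West'),
--     ('rustenburg', 'North West'),
--     ('klerksdorp', 'North West'),
--     ('potchefstroom', 'North West'),
--     ('brits', 'North West'),
--     ('lichtenburg', 'North West'),
--     ('vryburg', 'North West'),
--     ('taung', 'North West'),
--     ('northern cape', 'Northern Cape'),
--     ('kimberley', 'Northern Cape'),
--     ('upington', 'Northern Cape'),
--     ('springbok', 'Northern Cape'),
--     ('de aar', 'Northern Cape'),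
--     ('prieska', 'Northern Cape'),
--     ('kuruman', 'Northern Cape'),
--     ('kathu', 'Northern Cape'),
--     ('postmasburg', 'Northern Cape'),
--     ('calvinia', 'Northern Cape'),
--     ('colesberg', 'Northern Cape'),
--     ('victoria west', 'Northern Cape'),
--     ('carnarvon', 'Northern Cape'),
--     ('sutherland', 'Northern Cape'),
--     ('pofadder', 'Northern Cape'),
--     ('kakamas', 'Northern Cape'),
--     ('groblershoop', 'Northern Cape'),
--     ('barkly west', 'Northern Cape'),
--     ('warrenton', 'Northern Cape'),
--     ('hartswater', 'Northern Cape'),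
--     ('douglas', 'Northern Cape'),
--     ('hopetown', 'Northern Cape'),
--     ('petrusville', 'Northern Cape'),
--     ('port nolloth', 'Northern Cape'),
--     ('garies', 'Northern Cape'),
-- ]
--
-- # Flat precomputed matcher: one pass over (keyword, province) pairs collecting the
-- # set of matched provinces, then an ordered selection over the declared order.
--
-- from typing import Optional
--
--
-- def detect_province(text: str) -> Optional[str]:
--     t = text.lower()
--     matched = set()
--     for kw, prov in _KEYWORD_PROVINCE:
--         if kw in t:
--             matched.add(prov)
--     for p in _PROVINCES:
--         if p in matched:
--             return p
--     return None
-- ===== Notes on version B (the rewrite author's own statement) =====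
-- stated objective: alternative
-- what changed: Replaces A's per-province loop with an inner any() scan and early return by a module-load flat (keyword, province) matcher list scanned in one pass to collect the set of matched provinces, followed by an ordered selection over the declared province order (B also drops A's redundant empty-text guard).
import Mathlib
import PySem

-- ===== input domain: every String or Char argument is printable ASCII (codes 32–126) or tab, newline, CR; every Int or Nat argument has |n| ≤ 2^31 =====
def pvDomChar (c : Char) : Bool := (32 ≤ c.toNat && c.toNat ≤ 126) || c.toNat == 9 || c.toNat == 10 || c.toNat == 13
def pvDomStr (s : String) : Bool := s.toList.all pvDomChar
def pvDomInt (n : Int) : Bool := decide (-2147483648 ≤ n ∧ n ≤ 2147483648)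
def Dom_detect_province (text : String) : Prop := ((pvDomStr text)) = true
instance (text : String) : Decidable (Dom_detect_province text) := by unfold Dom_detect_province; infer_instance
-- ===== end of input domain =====

-- B replaces A's per-province nested scans by a precomputed flat (keyword, province) matcher list
-- scanned once to build the matched set, then an ordered pick over the declared province order
-- (alternative decomposition, same cost).

-- module constant PROVINCE_KEYWORDS (A's data)
def pvTable : List (String × List String) := [
  ("Gauteng", ["gauteng", "johannesburg", "pretoria", "ekurhuleni", "soweto", "midrand", "tshwane", "centurion", "sandton", "randburg", "roodepoort", "alexandra", "diepsloot", "ivory park", "katlehong", "thokoza"]),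
  ("Western Cape", ["western cape", "cape town", "stellenbosch", "george", "paarl", "worcester", "khayelitsha", "mitchells plain", "atlantis", "beaufort west", "ceres", "hermanus", "saldanha", "vredenburg"]),
  ("KwaZulu-Natal", ["kwazulu-natal", "kzn", "durban", "pietermaritzburg", "richards bay", "ethekwini", "umhlanga", "phoenix", "chatsworth", "newcastle", "ladysmith", "port shepstone", "empangeni"]),
  ("Eastern Cape", ["eastern cape", "gqeberha", "port elizabeth", "east london", "mthatha", "buffalo city", "queenstown", "graaff-reinet", "aliwal north", "matatiele", "mount frere", "lusikisiki", "butterworth", "komani"]),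
  ("Free State", ["free state", "bloemfontein", "mangaung", "welkom", "bethlehem", "kroonstad", "sasolburg", "phuthaditjhaba", "harrismith"]),
  ("Limpopo", ["limpopo", "polokwane", "tzaneen", "bela-bela", "lephalale", "modimolle", "thohoyandou", "burgersfort", "giyani", "makhado"]),
  ("Mpumalanga", ["mpumalanga", "nelspruit", "mbombela", "witbank", "emalahleni", "middelburg", "secunda", "ermelo", "kabokweni", "malelane"]),
  ("North West", ["north west", "mahikeng", "rustenburg", "klerksdorp", "potchefstroom", "brits", "lichtenburg", "vryburg", "taung"]),
  ("Northern Cape", ["northern cape", "kimberley", "upington", "springbok", "de aar", "prieska", "kuruman", "kathu", "postmasburg", "calvinia", "colesberg", "victoria west", "carnarvon", "sutherland", "pofadder", "kakamas", "groblershoop", "barkly west", "warrenton", "hartswater", "douglas", "hopetown", "petrusville", "port nolloth", "garies"])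
]

-- ===== PORT A =====
def pvLoopA : List (String × List String) → List Char → Option String
  | [], _ => none
  | (p, kws) :: rest, t =>
      if kws.any (fun k => PySem.Chars.isIn k.toList t) then some p else pvLoopA rest t

def detect_province (text : String) : Option String :=
  if text.toList = [] then none
  else pvLoopA pvTable (PySem.Chars.lower text.toList)

-- ===== PORT B =====
-- Source B's module-load constants _PROVINCES and _KEYWORD_PROVINCE, as the literals Source B carries
def pvOrder : List String := ["Gauteng", "Western Cape", "KwaZulu-Natal", "Eastern Cape", "Free State", "Limpopo", "Mpumalanga", "North West", "Northern Cape"]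

def pvFlatB : List (String × String) := [
  ("gauteng", "Gauteng"),
  ("johannesburg", "Gauteng"),
  ("pretoria", "Gauteng"),
  ("ekurhuleni", "Gauteng"),
  ("soweto", "Gauteng"),
  ("midrand", "Gauteng"),
  ("tshwane", "Gauteng"),
  ("centurion", "Gauteng"),
  ("sandton", "Gauteng"),
  ("randburg", "Gauteng"),
  ("roodepoort", "Gauteng"),
  ("alexandra", "Gauteng"),
  ("diepsloot", "Gauteng"),
  ("ivory park", "Gauteng"),
  ("katlehong", "Gauteng"),
  ("thokoza", "Gauteng"),
  ("western cape", "Western Cape"),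
  ("cape town", "Western Cape"),
  ("stellenbosch", "Western Cape"),
  ("george", "Western Cape"),
  ("paarl", "Western Cape"),
  ("worcester", "Western Cape"),
  ("khayelitsha", "Western Cape"),
  ("mitchells plain", "Western Cape"),
  ("atlantis", "Western Cape"),
  ("beaufort west", "Western Cape"),
  ("ceres", "Western Cape"),
  ("hermanus", "Western Cape"),
  ("saldanha", "Western Cape"),
  ("vredenburg", "Western Cape"),
  ("kwazulu-natal", "KwaZulu-Natal"),
  ("kzn", "KwaZulu-Natal"),
  ("durban", "KwaZulu-Natal"),
  ("pietermaritzburg", "KwaZulu-Natal"),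
  ("richards bay", "KwaZulu-Natal"),
  ("ethekwini", "KwaZulu-Natal"),
  ("umhlanga", "KwaZulu-Natal"),
  ("phoenix", "KwaZulu-Natal"),
  ("chatsworth", "KwaZulu-Natal"),
  ("newcastle", "KwaZulu-Natal"),
  ("ladysmith", "KwaZulu-Natal"),
  ("port shepstone", "KwaZulu-Natal"),
  ("empangeni", "KwaZulu-Natal"),
  ("eastern cape", "Eastern Cape"),
  ("gqeberha", "Eastern Cape"),
  ("port elizabeth", "Eastern Cape"),
  ("east london", "Eastern Cape"),
  ("mthatha", "Eastern Cape"),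
  ("buffalo city", "Eastern Cape"),
  ("queenstown", "Eastern Cape"),
  ("graaff-reinet", "Eastern Cape"),
  ("aliwal north", "Eastern Cape"),
  ("matatiele", "Eastern Cape"),
  ("mount frere", "Eastern Cape"),
  ("lusikisiki", "Eastern Cape"),
  ("butterworth", "Eastern Cape"),
  ("komani", "Eastern Cape"),
  ("free state", "Free State"),
  ("bloemfontein", "Free State"),
  ("mangaung", "Free State"),
  ("welkom", "Free State"),
  ("bethlehem", "Free State"),
  ("kroonstad", "Free State"),
  ("sasolburg", "Free State"),
  ("phuthaditjhaba", "Free State"),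
  ("harrismith", "Free State"),
  ("limpopo", "Limpopo"),
  ("polokwane", "Limpopo"),
  ("tzaneen", "Limpopo"),
  ("bela-bela", "Limpopo"),
  ("lephalale", "Limpopo"),
  ("modimolle", "Limpopo"),
  ("thohoyandou", "Limpopo"),
  ("burgersfort", "Limpopo"),
  ("giyani", "Limpopo"),
  ("makhado", "Limpopo"),
  ("mpumalanga", "Mpumalanga"),
  ("nelspruit", "Mpumalanga"),
  ("mbombela", "Mpumalanga"),
  ("witbank", "Mpumalanga"),
  ("emalahleni", "Mpumalanga"),
  ("middelburg", "Mpumalanga"),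
  ("secunda", "Mpumalanga"),
  ("ermelo", "Mpumalanga"),
  ("kabokweni", "Mpumalanga"),
  ("malelane", "Mpumalanga"),
  ("north west", "North West"),
  ("mahikeng", "North West"),
  ("rustenburg", "North West"),
  ("klerksdorp", "North West"),
  ("potchefstroom", "North West"),
  ("brits", "North West"),
  ("lichtenburg", "North West"),
  ("vryburg", "North West"),
  ("taung", "North West"),
  ("northern cape", "Northern Cape"),
  ("kimberley", "Northern Cape"),
  ("upington", "Northern Cape"),
  ("springbok", "Northern Cape"),
  ("de aar", "Northern Cape"),
  ("prieska", "Northern Cape"),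
  ("kuruman", "Northern Cape"),
  ("kathu", "Northern Cape"),
  ("postmasburg", "Northern Cape"),
  ("calvinia", "Northern Cape"),
  ("colesberg", "Northern Cape"),
  ("victoria west", "Northern Cape"),
  ("carnarvon", "Northern Cape"),
  ("sutherland", "Northern Cape"),
  ("pofadder", "Northern Cape"),
  ("kakamas", "Northern Cape"),
  ("groblershoop", "Northern Cape"),
  ("barkly west", "Northern Cape"),
  ("warrenton", "Northern Cape"),
  ("hartswater", "Northern Cape"),
  ("douglas", "Northern Cape"),
  ("hopetown", "Northern Cape"),
  ("petrusville", "Northern Cape"),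
  ("port nolloth", "Northern Cape"),
  ("garies", "Northern Cape")]

-- the first for-loop: matched = set(); for kw, prov in _KEYWORD_PROVINCE: if kw in t: matched.add(prov)
def pvMatchedB (t : List Char) : PySem.Set String :=
  pvFlatB.foldl
    (fun s kp => if PySem.Chars.isIn kp.1.toList t then PySem.Set.add s kp.2 else s)
    PySem.Set.empty

-- the second for-loop with early return: for p in _PROVINCES: if p in matched: return p
def detect_province_alt (text : String) : Option String :=
  pvOrder.find? (fun p => PySem.Set.contains (pvMatchedB (PySem.Chars.lower text.toList)) p)

-- ===== PRECONDITION & SPEC =====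
def Spec_detect_province (text : String) (out : Option String) : Prop := out = detect_province_alt text
instance (text : String) (out : Option String) : Decidable (Spec_detect_province text out) := by unfold Spec_detect_province; infer_instance

-- ===== CLAIM (what is proved, stated in full; the proofs are below) =====
def Claim_equal_detect_province : Prop := ∀ (text : String), Dom_detect_province text → Spec_detect_province text (detect_province text)

-- ===== LEMMAS AND PROOFS =====

-- B's literal module-load constants agree with A's table
theorem pv_flat_eq : pvFlatB = pvTable.flatMap (fun pr => pr.2.map (fun k => (k, pr.1))) := by decide
theorem pv_order_eq : pvOrder = pvTable.map Prod.fst := by decide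

-- injectivity of province names over the table, from nodup of the name column
theorem pv_table_inj {pr qr : String × List String} (hp : pr ∈ pvTable) (hq : qr ∈ pvTable)
    (he : pr.1 = qr.1) : pr = qr := by
  have hnd : (pvTable.map Prod.fst).Nodup := by decide
  exact List.inj_on_of_nodup_map hnd hp hq he

-- membership in B's fold-built set
theorem pv_mem_fold (t : List Char) (l : List (String × String)) (s : PySem.Set String)
    (p : String) :
    (p ∈ l.foldl
        (fun s kp => if PySem.Chars.isIn kp.1.toList t then PySem.Set.add s kp.2 else s) s)
      ↔ p ∈ s ∨ ∃ kp ∈ l, PySem.Chars.isIn kp.1.toList t = true ∧ kp.2 = p := by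
  induction l generalizing s with
  | nil => simp [List.foldl]
  | cons kp rest ih =>
      simp only [List.foldl_cons, ih, List.mem_cons]
      by_cases h : PySem.Chars.isIn kp.1.toList t = true
      · simp [h, PySem.Set.mem_add]
        tauto
      · simp [h]

-- membership in B's matched set = A's per-province any-scan, for each table row
theorem pv_contains_eq (t : List Char) {pr : String × List String} (hpr : pr ∈ pvTable) :
    PySem.Set.contains (pvMatchedB t) pr.1
      = pr.2.any (fun k => PySem.Chars.isIn k.toList t) := by
  rw [Bool.eq_iff_iff, PySem.Set.contains_iff]
  unfold pvMatchedB
  rw [pv_mem_fold]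
  simp only [pv_flat_eq, List.mem_flatMap, List.mem_map, List.any_eq_true, PySem.Set.empty]
  constructor
  · rintro (h | ⟨⟨kw, q⟩, ⟨qr, hqr, k, hk, hkp⟩, hin, hsnd⟩)
    · simp at h
    · cases hkp
      have : qr = pr := pv_table_inj hqr hpr hsnd
      subst this
      exact ⟨kw, hk, hin⟩
  · rintro ⟨k, hk, hin⟩
    exact Or.inr ⟨(k, pr.1), ⟨pr, hpr, k, hk, rfl⟩, hin, rfl⟩

-- A's early-return loop over any sub-table = B's find? over its name column
theorem pv_loop_eq (t : List Char) (tb : List (String × List String)) (q : String → Bool)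
    (h : ∀ pr ∈ tb, q pr.1 = pr.2.any (fun k => PySem.Chars.isIn k.toList t)) :
    pvLoopA tb t = (tb.map Prod.fst).find? q := by
  induction tb with
  | nil => rfl
  | cons pr rest ih =>
      obtain ⟨p, kws⟩ := pr
      have hq := h (p, kws) (List.mem_cons_self ..)
      have ih' := ih (fun pr hpr => h pr (List.mem_cons_of_mem _ hpr))
      simp only [pvLoopA, List.map_cons, List.find?_cons, hq]
      cases hkw : kws.any (fun k => PySem.Chars.isIn k.toList t) <;> simp [ih']

-- ===== VERDICT (by name: the statement is the Claim_ definition above) =====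
theorem detect_province_spec : Claim_equal_detect_province := by
  intro text _
  unfold Spec_detect_province detect_province detect_province_alt
  rw [pv_order_eq]
  by_cases h : text.toList = []
  · rw [if_pos h, h]
    decide
  · rw [if_neg h]
    exact pv_loop_eq _ _ _ (fun pr hpr => pv_contains_eq _ hpr)
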